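-- pv_equiv track=rewrite | github.com/valerii369/avatar_new | backend/app/services/dsb/natal_chart.py | calc_unaspected_planets
-- ===== SOURCE A (Python) =====
-- DERIVED_POINTS = {"asc", "mc", "part_of_fortune", "south_node"}
--
-- MAJOR_ASPECT_TYPES = {"conjunction", "opposition", "trine", "square", "sextile"}
--
-- def calc_unaspected_planets(planets: dict, aspects: list) -> list[str]:
--     """
--     Planets with ZERO major aspects — wild cards, intense but unintegrated energy.
--     Major aspects: conjunction, opposition, trine, square, sextile.
--     """
--     aspected: set[str] = set()
--     for asp in aspects:
--         if asp["type"] in MAJOR_ASPECT_TYPES: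
--             aspected.add(asp["planet_a"])
--             aspected.add(asp["planet_b"])
--     skip = DERIVED_POINTS | {"asc", "mc"}
--     return [
--         name for name in planets
--         if not planets[name].get("is_angle")
--         and name not in skip
--         and name not in aspected
--     ]
-- ===== SOURCE B (Python) =====
-- MAJOR_ASPECT_TYPES = {"conjunction", "opposition", "trine", "square", "sextile"}
--
-- SKIP = {"asc", "mc", "part_of_fortune", "south_node"}
--
--
-- def calc_unaspected_planets(planets: dict, aspects: list) -> list[str]:
--     """Planets with zero major aspects: for each eligible planet, scan the
--     aspect list directly instead of precomputing a set of aspected names."""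
--
--     def has_major(name):
--         return any(
--             asp["type"] in MAJOR_ASPECT_TYPES
--             and (name == asp["planet_a"] or name == asp["planet_b"])
--             for asp in aspects
--         )
--
--     out = []
--     for name, attrs in planets.items():
--         if not attrs.get("is_angle") and name not in SKIP and not has_major(name):
--             out.append(name)
--     return out
-- ===== Notes on version B (the rewrite author's own statement) =====
-- stated objective: alternative
-- what changed: B drops A's precomputed `aspected` set entirely and instead, for each eligible planet, scans the aspect list directly with any(); Pre_ additionally requires the aspect keys A indexes to be present (else A raises KeyError) and, in the Lean list model only, distinct planet names (a real Python dict always has them).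
import Mathlib
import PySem

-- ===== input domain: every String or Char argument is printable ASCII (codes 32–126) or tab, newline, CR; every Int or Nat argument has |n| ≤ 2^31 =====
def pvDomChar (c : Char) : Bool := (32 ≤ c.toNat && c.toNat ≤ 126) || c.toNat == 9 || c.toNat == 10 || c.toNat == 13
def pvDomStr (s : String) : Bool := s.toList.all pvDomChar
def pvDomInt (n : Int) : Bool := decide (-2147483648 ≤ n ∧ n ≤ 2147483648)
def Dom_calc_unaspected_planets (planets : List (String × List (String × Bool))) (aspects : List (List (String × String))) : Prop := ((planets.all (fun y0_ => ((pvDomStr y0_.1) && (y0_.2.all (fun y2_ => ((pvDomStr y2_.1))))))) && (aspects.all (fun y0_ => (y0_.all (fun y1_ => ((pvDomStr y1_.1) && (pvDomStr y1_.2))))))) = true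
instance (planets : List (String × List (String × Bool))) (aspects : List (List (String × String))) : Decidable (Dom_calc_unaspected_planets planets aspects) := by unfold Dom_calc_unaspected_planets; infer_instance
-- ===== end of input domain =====

-- B replaces A's precomputed `aspected` set by a direct per-planet scan of the
-- aspect list (no auxiliary set at all); alternative decomposition, not claimed faster.

-- MAJOR_ASPECT_TYPES (membership test only, so a list of the distinct elements)
def pvMajor : List String := ["conjunction", "opposition", "trine", "square", "sextile"]
-- skip = DERIVED_POINTS | {"asc","mc"} (A) / SKIP (B): same four names
def pvSkip : List String := ["asc", "mc", "part_of_fortune", "south_node"]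

-- ===== PORT A =====
def calc_unaspected_planets (planets : List (String × List (String × Bool))) (aspects : List (List (String × String))) : List String :=
  -- aspected = set(); for asp in aspects: if asp["type"] in MAJOR: add planet_a, planet_b
  let aspected : PySem.Set String := aspects.foldl (fun s asp =>
    if pvMajor.contains ((PySem.Dict.mk asp).getD "type" "") then
      PySem.Set.add (PySem.Set.add s ((PySem.Dict.mk asp).getD "planet_a" ""))
        ((PySem.Dict.mk asp).getD "planet_b" "")
    else s) PySem.Set.empty
  -- [name for name in planets if not planets[name].get("is_angle") and name not in skip and name not in aspected]
  ((PySem.Dict.mk planets).keys).filter (fun name =>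
    !((PySem.Dict.mk ((PySem.Dict.mk planets).getD name [])).getD "is_angle" false)
      && !(pvSkip.contains name)
      && !(PySem.Set.contains aspected name))

-- ===== PORT B =====
-- has_major(name) = any(asp["type"] in MAJOR and (name == asp["planet_a"] or name == asp["planet_b"]) for asp in aspects)
def pvHasMajor (aspects : List (List (String × String))) (name : String) : Bool :=
  aspects.any (fun asp =>
    pvMajor.contains ((PySem.Dict.mk asp).getD "type" "")
      && (name == (PySem.Dict.mk asp).getD "planet_a" ""
          || name == (PySem.Dict.mk asp).getD "planet_b" ""))

def calc_unaspected_planets_alt (planets : List (String × List (String × Bool))) (aspects : List (List (String × String))) : List String :=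
  -- out = []; for name, attrs in planets.items(): if …: out.append(name); return out
  planets.foldl (fun acc p =>
    if !((PySem.Dict.mk p.2).getD "is_angle" false)
        && !(pvSkip.contains p.1)
        && !(pvHasMajor aspects p.1)
    then acc ++ [p.1] else acc) []

-- ===== PRECONDITION & SPEC =====
-- Pre_ excludes (a) aspects on which A raises KeyError ("type" missing, or a major aspect
-- missing "planet_a"/"planet_b"), and (b) association lists with duplicate planet names,
-- which no Python dict can produce (they exist only in the list model of dict).
def Pre_calc_unaspected_planets (planets : List (String × List (String × Bool))) (aspects : List (List (String × String))) : Prop :=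
  (planets.map Prod.fst).Nodup ∧
  (aspects.all (fun asp =>
    (PySem.Dict.mk asp).contains "type"
      && (!(pvMajor.contains ((PySem.Dict.mk asp).getD "type" ""))
          || ((PySem.Dict.mk asp).contains "planet_a" && (PySem.Dict.mk asp).contains "planet_b")))) = true
instance (planets : List (String × List (String × Bool))) (aspects : List (List (String × String))) : Decidable (Pre_calc_unaspected_planets planets aspects) := by unfold Pre_calc_unaspected_planets; infer_instance

def pvWitness_calc_unaspected_planets : (List (String × List (String × Bool))) × (List (List (String × String))) :=
  ([("sun", [("is_angle", false)]), ("asc", [("is_angle", true)]), ("moon", [])],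
   [[("type", "trine"), ("planet_a", "moon"), ("planet_b", "venus")],
    [("type", "quintile"), ("planet_a", "sun")]])

def Spec_calc_unaspected_planets (planets : List (String × List (String × Bool))) (aspects : List (List (String × String))) (out : List String) : Prop := out = calc_unaspected_planets_alt planets aspects
instance (planets : List (String × List (String × Bool))) (aspects : List (List (String × String))) (out : List String) : Decidable (Spec_calc_unaspected_planets planets aspects out) := by unfold Spec_calc_unaspected_planets; infer_instance

-- ===== CLAIM (what is proved, stated in full; the proofs are below) =====
def Claim_equal_calc_unaspected_planets : Prop := ∀ (planets : List (String × List (String × Bool))) (aspects : List (List (String × String))), Dom_calc_unaspected_planets planets aspects → Pre_calc_unaspected_planets planets aspects → Spec_calc_unaspected_planets planets aspects (calc_unaspected_planets planets aspects)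

-- ===== LEMMAS AND PROOFS =====

lemma pv_contains_add (s : PySem.Set String) (x y : String) :
    PySem.Set.contains (PySem.Set.add s x) y = (PySem.Set.contains s y || y == x) := by
  by_cases hyx : y = x
  · subst hyx
    simp only [PySem.Set.add, PySem.Set.contains]
    split_ifs with h <;> simp_all
  · simp only [PySem.Set.add, PySem.Set.contains]
    split_ifs with h <;> simp_all

-- membership in A's `aspected` set, accumulated by the fold, is B's per-name scan
lemma pv_aspected_contains (aspects : List (List (String × String))) (s : PySem.Set String) (name : String) :
    PySem.Set.contains
      (aspects.foldl (fun s asp =>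
        if pvMajor.contains ((PySem.Dict.mk asp).getD "type" "") then
          PySem.Set.add (PySem.Set.add s ((PySem.Dict.mk asp).getD "planet_a" ""))
            ((PySem.Dict.mk asp).getD "planet_b" "")
        else s) s) name
    = (PySem.Set.contains s name || pvHasMajor aspects name) := by
  induction aspects generalizing s with
  | nil => simp [pvHasMajor]
  | cons asp rest ih =>
    rw [List.foldl_cons]
    by_cases h : pvMajor.contains ((PySem.Dict.mk asp).getD "type" "") = true
    · rw [if_pos h, ih, pv_contains_add, pv_contains_add]
      have h' : ((PySem.Dict.mk asp).getD "type" "" ∈ pvMajor) := by simpa using h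
      simp [pvHasMajor, h', Bool.or_assoc]
    · rw [if_neg h, ih]
      have h' : ¬((PySem.Dict.mk asp).getD "type" "" ∈ pvMajor) := by simpa using h
      simp [pvHasMajor, h']

lemma pv_foldl_append_filter (l : List (String × List (String × Bool))) (p : String × List (String × Bool) → Bool) (acc : List String) :
    l.foldl (fun acc x => if p x then acc ++ [x.1] else acc) acc = acc ++ (l.filter p).map Prod.fst := by
  induction l generalizing acc with
  | nil => simp
  | cons x xs ih =>
    by_cases h : p x = true <;> simp [h, ih]

lemma pv_filter_map_fst (l : List (String × List (String × Bool))) (p : String → Bool) :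
    (l.map Prod.fst).filter p = (l.filter (fun pr => p pr.1)).map Prod.fst := by
  induction l with
  | nil => simp
  | cons x xs ih => by_cases h : p x.1 = true <;> simp [h, ih]

-- ===== VERDICT (by name: the statement is the Claim_ definition above) =====
theorem calc_unaspected_planets_spec : Claim_equal_calc_unaspected_planets := by
  intro planets aspects _ hpre
  unfold Spec_calc_unaspected_planets calc_unaspected_planets calc_unaspected_planets_alt
  rw [pv_foldl_append_filter]
  simp only [List.nil_append]
  have hkeys : (PySem.Dict.mk planets).keys = planets.map Prod.fst := rfl
  have hlook : ∀ pr ∈ planets, (PySem.Dict.mk planets).getD pr.1 [] = pr.2 := by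
    intro pr hpr
    have hg : (PySem.Dict.mk planets).get? pr.1 = some pr.2 := by
      apply PySem.Dict.get?_of_mem_items
      · exact hpr
      · rw [hkeys]; exact hpre.1
    simp [PySem.Dict.getD_eq_get?_getD, hg]
  rw [hkeys, pv_filter_map_fst]
  congr 1
  apply List.filter_congr
  intro pr hpr
  rw [hlook pr hpr, pv_aspected_contains]
  simp [PySem.Set.empty, PySem.Set.contains]
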